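-- pv_equiv track=rewrite | github.com/sdjuric00/machine-learning-ftn | 3-support-vector-machine/ML23-Z3-tim6_23.py | compress_tokens_of_interest
-- ===== SOURCE A (Python) =====
-- def compress_tokens_of_interest(row: str):
--     TKS_OF_INTER = [
--         "bajat", "besplatn", "bezobraz", "bezukus", "bezvez", "bljutav", "bozanstven", "disappoint", "dobr", "fantastic", "fenomenal",
--         "gnjec", "gumen", "hladn", "hval", "ideal", "izuzet", "izvanred", "izvrs", "jeftin", "kasn", "kolicin", "komentar", "korekt",
--         "ljubaz", "lose", "losi", "najbolj", "najbrz", "najgor", "nejestiv", "neslan", "neukus", "odlic", "odusev", "odvrat",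
--         "ohlad", "osrednj", "perfekt", "podgre", "pogres", "povolj", "prekuvan", "prepecen", "preporu", "preskup", "preukus", "prezadov",
--         "pristoj", "profesional", "prosec", "prosut", "razocar", "savrsen", "sjaj", "solid", "svez", "uzas", "vrhu", "zabor", "zadovolj",
--         "zagore"
--     ]
--     tokens = row.split(" ")
--     for ind, tk in enumerate(tokens):
--         for toi in TKS_OF_INTER:
--             if toi in tk:
--                 tokens[ind] = toi if tk[0] != "!" else "!" + toi
--                 break
--     return " ".join(tokens)
-- ===== SOURCE B (Python) =====
-- def compress_tokens_of_interest(row: str):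
--     TKS_OF_INTER = [
--         "bajat", "besplatn", "bezobraz", "bezukus", "bezvez", "bljutav", "bozanstven", "disappoint", "dobr", "fantastic", "fenomenal",
--         "gnjec", "gumen", "hladn", "hval", "ideal", "izuzet", "izvanred", "izvrs", "jeftin", "kasn", "kolicin", "komentar", "korekt",
--         "ljubaz", "lose", "losi", "najbolj", "najbrz", "najgor", "nejestiv", "neslan", "neukus", "odlic", "odusev", "odvrat",
--         "ohlad", "osrednj", "perfekt", "podgre", "pogres", "povolj", "prekuvan", "prepecen", "preporu", "preskup", "preukus", "prezadov",
--         "pristoj", "profesional", "prosec", "prosut", "razocar", "savrsen", "sjaj", "solid", "svez", "uzas", "vrhu", "zabor", "zadovolj",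
--         "zagore"
--     ]
--     tokens = row.split(" ")
--     # outer loop over the substrings; resolved[i] holds the replacement once the
--     # first (highest-priority) matching substring for token i has been seen
--     resolved = [None] * len(tokens)
--     for toi in TKS_OF_INTER:
--         resolved = [
--             r if r is not None
--             else (("!" + toi if tk[0] == "!" else toi) if toi in tk else None)
--             for r, tk in zip(resolved, tokens)
--         ]
--     return " ".join(r if r is not None else tk for r, tk in zip(resolved, tokens))
-- ===== Notes on version B (the rewrite author's own statement) =====
-- stated objective: alternative
-- what changed: Inverts the loop nesting: instead of scanning the interest list inside a per-token loop with break, B loops over the interest substrings once and sweeps the token list with a zip pass, keeping per token the first (highest-priority) replacement found so far in an Option array.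
import Mathlib
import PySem

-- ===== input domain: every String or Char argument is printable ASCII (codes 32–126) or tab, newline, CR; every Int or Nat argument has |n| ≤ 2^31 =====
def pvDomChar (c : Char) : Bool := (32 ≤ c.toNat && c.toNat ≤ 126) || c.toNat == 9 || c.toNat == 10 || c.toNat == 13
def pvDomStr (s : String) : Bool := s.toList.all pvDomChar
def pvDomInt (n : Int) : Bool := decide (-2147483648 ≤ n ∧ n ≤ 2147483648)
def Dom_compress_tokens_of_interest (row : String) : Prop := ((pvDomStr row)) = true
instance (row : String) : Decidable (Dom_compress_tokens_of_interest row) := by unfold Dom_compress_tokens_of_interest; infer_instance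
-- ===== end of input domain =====

-- B re-implements A with the loop nesting inverted (outer loop over the interest substrings,
-- one zip pass over the tokens per substring keeping the first match); same return value.

-- ===== PORT A =====
def pvTKS : List String := [
    "bajat", "besplatn", "bezobraz", "bezukus", "bezvez", "bljutav", "bozanstven", "disappoint", "dobr", "fantastic", "fenomenal",
    "gnjec", "gumen", "hladn", "hval", "ideal", "izuzet", "izvanred", "izvrs", "jeftin", "kasn", "kolicin", "komentar", "korekt",
    "ljubaz", "lose", "losi", "najbolj", "najbrz", "najgor", "nejestiv", "neslan", "neukus", "odlic", "odusev", "odvrat",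
    "ohlad", "osrednj", "perfekt", "podgre", "pogres", "povolj", "prekuvan", "prepecen", "preporu", "preskup", "preukus", "prezadov",
    "pristoj", "profesional", "prosec", "prosut", "razocar", "savrsen", "sjaj", "solid", "svez", "uzas", "vrhu", "zabor", "zadovolj",
    "zagore"]

-- A's inner `for toi in TKS_OF_INTER: … break` at index ind, mutating the token list
def pvAInner (tks : List String) (tokens : List String) (ind : Int) (tk : String) : List String :=
  match tks with
  | [] => tokens
  | toi :: rest =>
      if PySem.Str.isIn toi tk then
        PySem.List.pySetD tokens ind (if PySem.Str.pyGet? tk 0 ≠ some '!' then toi else "!" ++ toi)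
      else pvAInner rest tokens ind tk

def compress_tokens_of_interest (row : String) : String :=
  let tokens := (PySem.Str.split? row " ").getD []
  let tokens := (PySem.List.enumerate tokens 0).foldl
      (fun acc p => pvAInner pvTKS acc p.1 p.2) tokens
  PySem.Str.join " " tokens

-- ===== PORT B =====
-- Source B: (("!" + toi if tk[0] == "!" else toi) if toi in tk else None)
def pvTry (toi tk : String) : Option String :=
  if PySem.Str.isIn toi tk then
    some (if PySem.Str.pyGet? tk 0 = some '!' then "!" ++ toi else toi)
  else none

def compress_tokens_of_interest_alt (row : String) : String :=
  let tokens := (PySem.Str.split? row " ").getD []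
  let resolved : List (Option String) := tokens.map (fun _ => none)
  let resolved := pvTKS.foldl
      (fun res toi => List.zipWith (fun r tk => match r with | some v => some v | none => pvTry toi tk) res tokens)
      resolved
  PySem.Str.join " " (List.zipWith (fun r tk => r.getD tk) resolved tokens)

-- ===== PRECONDITION & SPEC =====
def Spec_compress_tokens_of_interest (row : String) (out : String) : Prop := out = compress_tokens_of_interest_alt row
instance (row : String) (out : String) : Decidable (Spec_compress_tokens_of_interest row out) := by unfold Spec_compress_tokens_of_interest; infer_instance

-- ===== CLAIM (what is proved, stated in full; the proofs are below) =====
def Claim_equal_compress_tokens_of_interest : Prop := ∀ (row : String), Dom_compress_tokens_of_interest row → Spec_compress_tokens_of_interest row (compress_tokens_of_interest row)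

-- ===== LEMMAS AND PROOFS =====

-- first-match characterisation shared by both proofs
def pvFM : List String → String → Option String
  | [], _ => none
  | toi :: rest, tk => if PySem.Str.isIn toi tk then some (if PySem.Str.pyGet? tk 0 = some '!' then "!" ++ toi else toi) else pvFM rest tk

lemma pvAInner_eq (tks tokens : List String) (ind : Int) (tk : String) :
    pvAInner tks tokens ind tk =
      match pvFM tks tk with
      | some v => PySem.List.pySetD tokens ind v
      | none => tokens := by
  induction tks with
  | nil => rfl
  | cons toi rest ih =>
      by_cases h : PySem.Chars.isIn toi.toList tk.toList = true
      · by_cases h0 : PySem.List.pyGet? tk.toList 0 = some '!' <;>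
          simp [pvAInner, pvFM, h, h0]
      · simp [pvAInner, pvFM, h, ih]

def pvG (tk : String) : String := (pvFM pvTKS tk).getD tk

-- A's enumerate fold maps each token through pvG
lemma pvAFold_eq (l : List String) : ∀ (pre : List String),
    (PySem.List.enumerate l (pre.length : Int)).foldl (fun acc p => pvAInner pvTKS acc p.1 p.2) (pre ++ l)
      = pre ++ l.map pvG := by
  induction l with
  | nil => simp [PySem.List.enumerate_nil]
  | cons tk rest ih =>
      intro pre
      rw [PySem.List.enumerate_cons, List.foldl_cons, pvAInner_eq]
      have hstep : (match pvFM pvTKS tk with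
          | some v => PySem.List.pySetD (pre ++ tk :: rest) (pre.length : Int) v
          | none => pre ++ tk :: rest) = (pre ++ [pvG tk]) ++ rest := by
        cases h : pvFM pvTKS tk with
        | none => simp [pvG, h]
        | some v =>
            simp only [PySem.List.pySetD_natCast, pvG, h, Option.getD_some]
            rw [List.set_append_right _ _ (le_refl pre.length)]
            simp
      rw [hstep]
      have := ih (pre ++ [pvG tk])
      simpa [List.append_assoc] using this

-- one outer step of B extends the processed-prefix first-match
lemma pvFM_append_singleton (Q : List String) (toi tk : String) :
    (match pvFM Q tk with | some v => some v | none => pvTry toi tk) = pvFM (Q ++ [toi]) tk := by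
  induction Q with
  | nil => simp [pvFM, pvTry]
  | cons q rest ih =>
      by_cases h : PySem.Chars.isIn q.toList tk.toList = true <;>
        simp [pvFM, h, ih]

-- B's fold over the substrings maps each token through the first match of the processed list
lemma pvBFold_eq (tokens : List String) (P : List String) : ∀ (Q : List String),
    P.foldl (fun res toi => List.zipWith (fun r tk => match r with | some v => some v | none => pvTry toi tk) res tokens)
      (tokens.map (fun tk => pvFM Q tk))
      = tokens.map (fun tk => pvFM (Q ++ P) tk) := by
  induction P with
  | nil => simp
  | cons toi rest ih =>
      intro Q
      rw [List.foldl_cons]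
      have hstep : List.zipWith (fun r tk => match r with | some v => some v | none => pvTry toi tk)
          (tokens.map (fun tk => pvFM Q tk)) tokens
          = tokens.map (fun tk => pvFM (Q ++ [toi]) tk) := by
        rw [List.zipWith_map_left, List.zipWith_self]
        exact List.map_congr_left (fun tk _ => pvFM_append_singleton Q toi tk)
      rw [hstep]
      have := ih (Q ++ [toi])
      simpa [List.append_assoc] using this

-- ===== VERDICT (by name: the statement is the Claim_ definition above) =====
theorem compress_tokens_of_interest_spec : Claim_equal_compress_tokens_of_interest := by
  intro row _
  unfold Spec_compress_tokens_of_interest compress_tokens_of_interest compress_tokens_of_interest_alt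
  simp only []
  set tokens := (PySem.Str.split? row " ").getD [] with htok
  have hA := pvAFold_eq tokens []
  simp only [List.nil_append, List.length_nil, Nat.cast_zero] at hA
  have hB := pvBFold_eq tokens pvTKS []
  simp only [List.nil_append] at hB
  have hinit : tokens.map (fun _ => (none : Option String)) = tokens.map (fun tk => pvFM [] tk) := rfl
  rw [hA, hinit, hB, List.zipWith_map_left, List.zipWith_self]
  rfl
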